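-- pv_equiv track=rewrite | github.com/juanlopolicaarpio/cocopan-monitor-3.0 | final.py | _is_terminated
-- ===== SOURCE A (Python) =====
-- def _is_terminated(title_lower: str, visible_lower: str) -> bool:
--     """Check if store is terminated or permanently closed"""
--     terminated_keywords = [
--         'terminated',
--         'permanently closed',
--         'closed permanently',
--         'no longer available',
--         'not available anymore',
--         'store has closed',
--         "closed"
--     ]
--
--     # Check in title
--     for keyword in terminated_keywords:
--         if keyword in title_lower:
--             return True
--
--     # Check in first 1000 chars of visible text
--     first_1000 = visible_lower[:1000]
--     for keyword in terminated_keywords: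
--         if keyword in first_1000:
--             return True
--
--     return False
-- ===== SOURCE B (Python) =====
-- # B: position-major scan — walk each haystack once, testing all keywords at each
-- # position with tuple str.startswith, instead of seven independent substring searches.
--
-- _KEYWORDS = ('terminated', 'permanently closed', 'closed permanently',
--              'no longer available', 'not available anymore',
--              'store has closed', 'closed')
--
--
-- def _is_terminated(title_lower: str, visible_lower: str) -> bool:
--     for hay in (title_lower, visible_lower[:1000]):
--         for i in range(len(hay)):
--             if hay.startswith(_KEYWORDS, i):
--                 return True
--     return False
-- ===== Notes on version B (the rewrite author's own statement) =====
-- stated objective: alternative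
-- what changed: B inverts the traversal: instead of A's keyword-major search (seven sequential 'keyword in haystack' substring scans per haystack), B makes a single position-major pass over each haystack, testing at every index whether any keyword starts there via tuple str.startswith.
import Mathlib
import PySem

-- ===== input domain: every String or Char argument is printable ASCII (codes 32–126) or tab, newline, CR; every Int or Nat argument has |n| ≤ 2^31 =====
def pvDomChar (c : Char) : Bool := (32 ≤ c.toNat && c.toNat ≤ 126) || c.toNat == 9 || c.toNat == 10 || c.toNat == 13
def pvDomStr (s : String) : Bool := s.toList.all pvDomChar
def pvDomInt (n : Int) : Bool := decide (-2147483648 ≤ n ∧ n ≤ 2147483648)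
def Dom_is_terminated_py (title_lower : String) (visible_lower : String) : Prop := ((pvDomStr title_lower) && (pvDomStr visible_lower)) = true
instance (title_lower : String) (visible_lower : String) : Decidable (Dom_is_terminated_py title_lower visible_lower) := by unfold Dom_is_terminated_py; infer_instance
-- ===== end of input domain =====

-- B replaces A's keyword-major search (seven sequential substring scans per haystack)
-- by a single position-major pass testing every keyword at each index (objective: alternative).


-- ===== PORT A =====
def pvTerminatedKeywords : List String :=
  ["terminated", "permanently closed", "closed permanently", "no longer available",
   "not available anymore", "store has closed", "closed"]

def is_terminated_py (title_lower : String) (visible_lower : String) : Bool :=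
  -- first loop: early return on a keyword in the title
  if pvTerminatedKeywords.any (fun k => PySem.Str.isIn k title_lower) then true
  else
    -- second loop over visible_lower[:1000]
    let first_1000 := PySem.Str.slice visible_lower none (some 1000)
    if pvTerminatedKeywords.any (fun k => PySem.Str.isIn k first_1000) then true
    else false

-- ===== PORT B =====
def pvKeywordsB : List String :=
  ["terminated", "permanently closed", "closed permanently", "no longer available",
   "not available anymore", "store has closed", "closed"]

-- hay.startswith(_KEYWORDS, i): exact for the nonnegative i produced by range(len(hay))
def is_terminated_py_alt (title_lower : String) (visible_lower : String) : Bool :=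
  [title_lower, PySem.Str.slice visible_lower none (some 1000)].any fun hay =>
    (List.range hay.toList.length).any fun i =>
      pvKeywordsB.any fun k => k.toList.isPrefixOf (hay.toList.drop i)

-- ===== PRECONDITION & SPEC =====
def Spec_is_terminated_py (title_lower : String) (visible_lower : String) (out : Bool) : Prop := out = is_terminated_py_alt title_lower visible_lower
instance (title_lower : String) (visible_lower : String) (out : Bool) : Decidable (Spec_is_terminated_py title_lower visible_lower out) := by unfold Spec_is_terminated_py; infer_instance

-- ===== CLAIM (what is proved, stated in full; the proofs are below) =====
def Claim_equal_is_terminated_py : Prop := ∀ (title_lower : String) (visible_lower : String), Dom_is_terminated_py title_lower visible_lower → Spec_is_terminated_py title_lower visible_lower (is_terminated_py title_lower visible_lower)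

-- ===== LEMMAS AND PROOFS =====

-- for a nonempty needle the bounded position scan coincides with the unbounded one
theorem pvBounded_prefix_drop (k s : List Char) (hk : k ≠ []) :
    (∃ i, i < s.length ∧ k <+: s.drop i) ↔ (∃ j, k <+: s.drop j) := by
  constructor
  · rintro ⟨i, _, hp⟩; exact ⟨i, hp⟩
  · rintro ⟨j, hp⟩
    by_cases h : j < s.length
    · exact ⟨j, h, hp⟩
    · exfalso
      rw [List.drop_eq_nil_of_le (by omega)] at hp
      exact hk (List.prefix_nil.mp hp)

-- the position-major scan of one haystack equals the keyword-major membership test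
theorem pvScan_eq_isIn (h : String) :
    ((List.range h.toList.length).any fun i =>
        pvKeywordsB.any fun k => k.toList.isPrefixOf (h.toList.drop i))
      = pvTerminatedKeywords.any fun k => PySem.Str.isIn k h := by
  have hBA : pvKeywordsB = pvTerminatedKeywords := rfl
  rw [Bool.eq_iff_iff]
  simp only [hBA, List.any_eq_true, List.mem_range, List.isPrefixOf_iff_prefix,
    PySem.Str.isIn_eq]
  constructor
  · rintro ⟨i, hi, k, hkmem, hp⟩
    exact ⟨k, hkmem, (PySem.Chars.exists_prefix_drop_iff_isIn _ _).mp ⟨i, hp⟩⟩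
  · rintro ⟨k, hkmem, hin⟩
    have hne : k.toList ≠ [] := by
      fin_cases hkmem <;> decide
    obtain ⟨j, hp⟩ := (PySem.Chars.exists_prefix_drop_iff_isIn _ _).mpr hin
    obtain ⟨i, hi, hp'⟩ := (pvBounded_prefix_drop _ _ hne).mpr ⟨j, hp⟩
    exact ⟨i, hi, k, hkmem, hp'⟩

-- ===== VERDICT (by name: the statement is the Claim_ definition above) =====
theorem is_terminated_py_spec : Claim_equal_is_terminated_py := by
  intro t v _
  unfold Spec_is_terminated_py is_terminated_py is_terminated_py_alt
  simp only [List.any_cons, List.any_nil, Bool.or_false, pvScan_eq_isIn]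
  split_ifs with h1 h2 <;> simp_all
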